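-- pv_equiv track=rewrite | github.com/aL0ver/ingreso-y-validacion-de-usuario | interfazzzz.py | userValidacion
-- ===== SOURCE A (Python) =====
-- usernames = ["admin", "noadmin"]
--
-- passwords = ["admin", "noadmin"]
--
-- def userValidacion(user,password):
--     intentos_user = 0
--     intentos_pass = 0
--     true_user = 0
--     true_pass = 0
--     for _ in usernames:
--         intentos_user += 1
--         iterable_user = usernames[intentos_user-1]
--         if iterable_user == user:
--             true_user += 1
--             break
--     if true_user == 1:
--         for _ in passwords:
--             intentos_pass += 1
--             iterable_pass = passwords[intentos_pass-1]
--             if iterable_pass == password: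
--                 true_pass += 1
--                 break
--     if true_pass == 1 and intentos_pass == intentos_user:
--         return True
-- ===== SOURCE B (Python) =====
-- usernames = ["admin", "noadmin"]
--
-- passwords = ["admin", "noadmin"]
--
-- def userValidacion(user, password):
--     for u, p in zip(usernames, passwords):
--         if u == user and p == password:
--             return True
-- ===== Notes on version B (the rewrite author's own statement) =====
-- stated objective: simpler
-- what changed: Replaced the two index-counting search loops plus index-equality comparison with a single zipped traversal of the parallel lists that returns True at the first position where both entries match (falling through to None otherwise).
import Mathlib
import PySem

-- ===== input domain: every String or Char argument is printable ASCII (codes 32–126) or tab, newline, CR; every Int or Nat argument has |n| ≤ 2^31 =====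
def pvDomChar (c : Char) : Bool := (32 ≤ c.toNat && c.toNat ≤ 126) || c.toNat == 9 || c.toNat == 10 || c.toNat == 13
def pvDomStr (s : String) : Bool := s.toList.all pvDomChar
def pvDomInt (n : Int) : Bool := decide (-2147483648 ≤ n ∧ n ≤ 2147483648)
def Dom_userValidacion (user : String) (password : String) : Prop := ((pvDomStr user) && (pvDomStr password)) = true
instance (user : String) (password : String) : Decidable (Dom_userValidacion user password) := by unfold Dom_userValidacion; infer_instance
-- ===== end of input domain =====

-- B replaces A's two index-counting search loops and index-equality test by a single
-- zipped traversal of the parallel lists (simpler decomposition; same O(n) cost).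


-- ===== PORT A =====
def pvUsernames : List String := ["admin", "noadmin"]
def pvPasswords : List String := ["admin", "noadmin"]

-- A's search loop: counts attempts, indexes the list by the counter, breaks on first match.
-- Returns (intentos, trueCount). The pyGet? `none` branch is unreachable (index always in range).
def pvLoopA (full : List String) (iter : List String) (target : String)
    (intentos : Int) (trueC : Int) : Int × Int :=
  match iter with
  | [] => (intentos, trueC)
  | _ :: rest =>
    let intentos' := intentos + 1
    match PySem.List.pyGet? full (intentos' - 1) with
    | none => (intentos', trueC)
    | some x => if x == target then (intentos', trueC + 1)
                else pvLoopA full rest target intentos' trueC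

def userValidacion (user : String) (password : String) : Option Bool :=
  let (intentos_user, true_user) := pvLoopA pvUsernames pvUsernames user 0 0
  let (intentos_pass, true_pass) :=
    if true_user == 1 then pvLoopA pvPasswords pvPasswords password 0 0 else (0, 0)
  if true_pass == 1 && intentos_pass == intentos_user then some true else none

-- ===== PORT B =====
def pvZipLoop (pairs : List (String × String)) (user : String) (password : String) : Option Bool :=
  match pairs with
  | [] => none
  | (u, p) :: rest =>
    if u == user && p == password then some true else pvZipLoop rest user password

def userValidacion_alt (user : String) (password : String) : Option Bool :=
  pvZipLoop (List.zip pvUsernames pvPasswords) user password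

-- ===== PRECONDITION & SPEC =====
def Spec_userValidacion (user : String) (password : String) (out : Option Bool) : Prop := out = userValidacion_alt user password
instance (user : String) (password : String) (out : Option Bool) : Decidable (Spec_userValidacion user password out) := by unfold Spec_userValidacion; infer_instance

-- ===== CLAIM (what is proved, stated in full; the proofs are below) =====
def Claim_equal_userValidacion : Prop := ∀ (user : String) (password : String), Dom_userValidacion user password → Spec_userValidacion user password (userValidacion user password)

-- ===== LEMMAS AND PROOFS =====

-- ===== VERDICT (by name: the statement is the Claim_ definition above) =====
theorem userValidacion_spec : Claim_equal_userValidacion := by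
  intro user password _
  unfold Spec_userValidacion userValidacion userValidacion_alt
  simp only [pvUsernames, pvPasswords, pvLoopA, pvZipLoop, List.zip,
    PySem.List.pyGet?, PySem.List.pyIdx?, List.zipWith]
  by_cases hu1 : ("admin" : String) = user <;>
  by_cases hu2 : ("noadmin" : String) = user <;>
  by_cases hp1 : ("admin" : String) = password <;>
  by_cases hp2 : ("noadmin" : String) = password <;>
    simp_all
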